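-- pv_equiv track=rewrite | github.com/navid72m/chatbot | chatbot/backend/rag_evaluator.py | _parse_question_generation_response
-- ===== SOURCE A (Python) =====
-- from typing import List, Dict, Any, Tuple, Optional
--
-- def _parse_question_generation_response(response: str) -> Tuple[Optional[str], Optional[str], Optional[str]]:
--     """Parse the LLM response to extract question, answer, and evidence."""
--     question = None
--     answer = None
--     evidence = None
--
--     lines = response.strip().split('\n')
--     for line in lines:
--         line = line.strip()
--         if line.startswith("QUESTION:"):
--             question = line[len("QUESTION:"):].strip()
--         elif line.startswith("ANSWER:"):
--             answer = line[len("ANSWER:"):].strip()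
--         elif line.startswith("EVIDENCE:"):
--             evidence = line[len("EVIDENCE:"):].strip()
--
--     return question, answer, evidence
-- ===== SOURCE B (Python) =====
-- from typing import Tuple, Optional
--
-- def _parse_question_generation_response(response: str) -> Tuple[Optional[str], Optional[str], Optional[str]]:
--     """Parse the LLM response to extract question, answer, and evidence.
--
--     Scans the stripped lines in REVERSE order and, per field, returns the
--     first (i.e. originally last) line carrying that field's prefix.
--     """
--     rev = [line.strip() for line in reversed(response.strip().split('\n'))]
--
--     def last_field(prefix):
--         for line in rev:
--             if line.startswith(prefix):
--                 return line[len(prefix):].strip()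
--         return None
--
--     return (last_field("QUESTION:"), last_field("ANSWER:"), last_field("EVIDENCE:"))
-- ===== Notes on version B (the rewrite author's own statement) =====
-- stated objective: alternative
-- what changed: Instead of one forward loop with if/elif branches that keeps overwriting three variables, B strips the lines once, reverses them, and for each keyword independently takes the first matching line of the reversed list (the originally last match), so no mutable state is threaded through a loop.
import Mathlib
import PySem

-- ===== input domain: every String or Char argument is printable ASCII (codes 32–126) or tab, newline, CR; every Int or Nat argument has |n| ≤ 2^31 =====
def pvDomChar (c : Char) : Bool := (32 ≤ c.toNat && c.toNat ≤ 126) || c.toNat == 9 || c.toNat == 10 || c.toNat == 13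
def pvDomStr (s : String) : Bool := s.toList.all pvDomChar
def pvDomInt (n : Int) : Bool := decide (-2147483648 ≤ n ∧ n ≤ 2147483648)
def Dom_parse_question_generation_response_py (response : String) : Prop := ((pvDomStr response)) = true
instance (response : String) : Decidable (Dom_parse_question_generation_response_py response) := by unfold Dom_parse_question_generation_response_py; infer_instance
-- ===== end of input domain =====

-- B replaces A's forward overwrite loop by a reversed-lines first-match search per keyword (alternative decomposition, same cost).

-- ===== PORT A =====
-- the loop body of A: strip the line, then the if/elif chain overwriting one slot
def pvStepA (st : Option String × Option String × Option String) (line : String) :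
    Option String × Option String × Option String :=
  let l := PySem.Str.strip line
  if PySem.Str.startswith l "QUESTION:" then
    (some (PySem.Str.strip (PySem.Str.slice l (some (PySem.Str.len "QUESTION:")) none)), st.2.1, st.2.2)
  else if PySem.Str.startswith l "ANSWER:" then
    (st.1, some (PySem.Str.strip (PySem.Str.slice l (some (PySem.Str.len "ANSWER:")) none)), st.2.2)
  else if PySem.Str.startswith l "EVIDENCE:" then
    (st.1, st.2.1, some (PySem.Str.strip (PySem.Str.slice l (some (PySem.Str.len "EVIDENCE:")) none)))
  else st

def parse_question_generation_response_py (response : String) :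
    Option String × Option String × Option String :=
  let lines := (PySem.Str.split? (PySem.Str.strip response) "\n").getD []  -- split? is none only for sep = ""; "\n" is non-empty
  lines.foldl pvStepA (none, none, none)

-- ===== PORT B =====
-- B's inner loop: first line of the (reversed, pre-stripped) list carrying the prefix
def pvLastField (rev : List String) (pref : String) : Option String :=
  (rev.find? (fun l => PySem.Str.startswith l pref)).map
    (fun l => PySem.Str.strip (PySem.Str.slice l (some (PySem.Str.len pref)) none))

def parse_question_generation_response_py_alt (response : String) :
    Option String × Option String × Option String :=
  -- split? is none only for sep = ""; "\n" is non-empty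
  let rev := (((PySem.Str.split? (PySem.Str.strip response) "\n").getD []).reverse).map PySem.Str.strip
  (pvLastField rev "QUESTION:", pvLastField rev "ANSWER:", pvLastField rev "EVIDENCE:")

-- ===== PRECONDITION & SPEC =====
def Spec_parse_question_generation_response_py (response : String) (out : Option String × Option String × Option String) : Prop := out = parse_question_generation_response_py_alt response
instance (response : String) (out : Option String × Option String × Option String) : Decidable (Spec_parse_question_generation_response_py response out) := by unfold Spec_parse_question_generation_response_py; infer_instance

-- ===== CLAIM (what is proved, stated in full; the proofs are below) =====
def Claim_equal_parse_question_generation_response_py : Prop := ∀ (response : String), Dom_parse_question_generation_response_py response → Spec_parse_question_generation_response_py response (parse_question_generation_response_py response)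

-- ===== LEMMAS AND PROOFS =====

-- two distinct-head prefixes of the same list are impossible
lemma pvPrefHead {a b : Char} {r1 r2 cs : List Char} (h1 : (a::r1) <+: cs) (h2 : (b::r2) <+: cs) : a = b := by
  rcases h1 with ⟨t1, rfl⟩
  exact ((List.cons_prefix_cons.mp h2).1).symm

lemma pvDisj (l : String) (p q : String) (hne : p.toList.head? ≠ q.toList.head?)
    (hp : p.toList ≠ []) (hq : q.toList ≠ [])
    (h : PySem.Str.startswith l p = true) : PySem.Str.startswith l q = false := by
  by_contra hqq
  rw [Bool.not_eq_false] at hqq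
  rw [PySem.Str.startswith_eq, PySem.Chars.startswith_iff] at h hqq
  cases hp' : p.toList with
  | nil => exact hp hp'
  | cons a r1 =>
    cases hq' : q.toList with
    | nil => exact hq hq'
    | cons b r2 =>
      rw [hp'] at h; rw [hq'] at hqq
      exact hne (by rw [hp', hq']; simp [pvPrefHead h hqq])

-- the scalar fold a single component of A's loop performs
lemma pvScalar (p : String → Bool) (e : String → String) (lines : List String) (x0 : Option String) :
    lines.foldl (fun x l => if p (PySem.Str.strip l) then some (e (PySem.Str.strip l)) else x) x0
      = Option.elim ((lines.map PySem.Str.strip).reverse.find? p) x0 (fun l => some (e l)) := by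
  induction lines generalizing x0 with
  | nil => simp
  | cons x ls ih =>
    simp only [List.foldl_cons, List.map_cons, List.reverse_cons, List.find?_append, ih]
    cases hf : (ls.map PySem.Str.strip).reverse.find? p with
    | some l => simp
    | none =>
      simp only [Option.none_or]
      by_cases hp : p (PySem.Str.strip x) = true <;> simp [hp, List.find?]

-- A's fold, componentwise, IS three independent scalar folds
lemma pvFoldComp (lines : List String) (s : Option String × Option String × Option String) :
    lines.foldl pvStepA s =
      ( lines.foldl (fun x l => if PySem.Str.startswith (PySem.Str.strip l) "QUESTION:" then some (PySem.Str.strip (PySem.Str.slice (PySem.Str.strip l) (some (PySem.Str.len "QUESTION:")) none)) else x) s.1,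
        lines.foldl (fun x l => if PySem.Str.startswith (PySem.Str.strip l) "ANSWER:" then some (PySem.Str.strip (PySem.Str.slice (PySem.Str.strip l) (some (PySem.Str.len "ANSWER:")) none)) else x) s.2.1,
        lines.foldl (fun x l => if PySem.Str.startswith (PySem.Str.strip l) "EVIDENCE:" then some (PySem.Str.strip (PySem.Str.slice (PySem.Str.strip l) (some (PySem.Str.len "EVIDENCE:")) none)) else x) s.2.2 ) := by
  induction lines generalizing s with
  | nil => simp
  | cons x ls ih =>
    simp only [List.foldl_cons, ih]
    unfold pvStepA
    by_cases hQ : PySem.Str.startswith (PySem.Str.strip x) "QUESTION:" = true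
    · have hA := pvDisj _ "QUESTION:" "ANSWER:" (by decide) (by decide) (by decide) hQ
      have hE := pvDisj _ "QUESTION:" "EVIDENCE:" (by decide) (by decide) (by decide) hQ
      simp at hQ hA hE
      simp [hQ, hA, hE]
    · by_cases hA : PySem.Str.startswith (PySem.Str.strip x) "ANSWER:" = true
      · have hE := pvDisj _ "ANSWER:" "EVIDENCE:" (by decide) (by decide) (by decide) hA
        simp at hQ hA hE
        simp [hQ, hA, hE]
      · by_cases hE : PySem.Str.startswith (PySem.Str.strip x) "EVIDENCE:" = true
        · simp at hQ hA hE
          simp [hQ, hA, hE]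
        · simp at hQ hA hE
          simp [hQ, hA, hE]

lemma pvAltComp (lines : List String) (pref : String) :
    pvLastField ((lines.reverse).map PySem.Str.strip) pref
      = Option.elim ((lines.map PySem.Str.strip).reverse.find? (fun l => PySem.Str.startswith l pref)) none
          (fun l => some (PySem.Str.strip (PySem.Str.slice l (some (PySem.Str.len pref)) none))) := by
  unfold pvLastField
  rw [List.map_reverse]
  cases hf : (lines.map PySem.Str.strip).reverse.find? (fun l => PySem.Str.startswith l pref) <;> simp

-- ===== VERDICT (by name: the statement is the Claim_ definition above) =====
theorem parse_question_generation_response_py_spec : Claim_equal_parse_question_generation_response_py := by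
  intro response _
  unfold Spec_parse_question_generation_response_py parse_question_generation_response_py parse_question_generation_response_py_alt
  simp only [pvFoldComp, pvAltComp]
  rw [pvScalar (fun l => PySem.Str.startswith l "QUESTION:") (fun l => PySem.Str.strip (PySem.Str.slice l (some (PySem.Str.len "QUESTION:")) none)),
      pvScalar (fun l => PySem.Str.startswith l "ANSWER:") (fun l => PySem.Str.strip (PySem.Str.slice l (some (PySem.Str.len "ANSWER:")) none)),
      pvScalar (fun l => PySem.Str.startswith l "EVIDENCE:") (fun l => PySem.Str.strip (PySem.Str.slice l (some (PySem.Str.len "EVIDENCE:")) none))]
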